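-- pv_equiv track=rewrite | github.com/KingGugu/TADA | src/ht_process.py | build_head_tail_relation
-- ===== SOURCE A (Python) =====
-- from typing import Dict, List, Set, DefaultDict
-- from collections import defaultdict
--
-- def build_head_tail_relation(user_seq: List[List[int]], head_items: Set[int], tail_items: Set[int], max_len):
--     head_relation: DefaultDict[int, Set[int]] = defaultdict(set)
--     tail_relation: DefaultDict[int, Set[int]] = defaultdict(set)
--     user_seq = [seq[:-2][-max_len:] for seq in user_seq]  # Avoid data leakage
--
--     for seq in user_seq:
--         for idx, item in enumerate(seq):
--             if item in head_items:
--                 if idx > 0 and seq[idx - 1] in tail_items: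
--                     head_relation[item].add(seq[idx - 1])
--
--                 if idx + 1 < len(seq) and seq[idx + 1] in tail_items:
--                     head_relation[item].add(seq[idx + 1])
--             if item in tail_items:
--                 if idx > 0:
--                     prev_item = seq[idx - 1]
--                     tail_relation[item].add(prev_item)
--     return head_relation, tail_relation
-- ===== SOURCE B (Python) =====
-- from collections import defaultdict
--
--
-- def build_head_tail_relation(user_seq, head_items, tail_items, max_len):
--     # Stage 1: materialize the adjacency-edge stream of the truncated sequences once.
--     edges = []
--     for seq in user_seq:
--         seq = seq[:-2][-max_len:]  # identical truncation (avoid data leakage)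
--         edges.extend(zip(seq, seq[1:]))
--     # Stage 2: head relation — one filtering pass over both orientations of each edge.
--     head_relation = defaultdict(set)
--     for a, b in edges:
--         for h, t in ((a, b), (b, a)):
--             if h in head_items and t in tail_items:
--                 head_relation[h].add(t)
--     # Stage 3: tail relation — an independent pass over the same edge stream.
--     tail_relation = defaultdict(set)
--     for a, b in edges:
--         if b in tail_items:
--             tail_relation[b].add(a)
--     return head_relation, tail_relation
-- ===== Notes on version B (the rewrite author's own statement) =====
-- stated objective: alternative
-- what changed: Replaces A's single fused index-based pass (enumerate with seq[idx-1]/seq[idx+1] bounds-checked lookups building both dicts at once) by a staged design: materialize the adjacency-edge list of all truncated sequences once, then build head_relation in its own pass that filters both orientations of each edge via an inner orientation loop, and tail_relation in a second independent pass over the same edge list.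
import Mathlib
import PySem

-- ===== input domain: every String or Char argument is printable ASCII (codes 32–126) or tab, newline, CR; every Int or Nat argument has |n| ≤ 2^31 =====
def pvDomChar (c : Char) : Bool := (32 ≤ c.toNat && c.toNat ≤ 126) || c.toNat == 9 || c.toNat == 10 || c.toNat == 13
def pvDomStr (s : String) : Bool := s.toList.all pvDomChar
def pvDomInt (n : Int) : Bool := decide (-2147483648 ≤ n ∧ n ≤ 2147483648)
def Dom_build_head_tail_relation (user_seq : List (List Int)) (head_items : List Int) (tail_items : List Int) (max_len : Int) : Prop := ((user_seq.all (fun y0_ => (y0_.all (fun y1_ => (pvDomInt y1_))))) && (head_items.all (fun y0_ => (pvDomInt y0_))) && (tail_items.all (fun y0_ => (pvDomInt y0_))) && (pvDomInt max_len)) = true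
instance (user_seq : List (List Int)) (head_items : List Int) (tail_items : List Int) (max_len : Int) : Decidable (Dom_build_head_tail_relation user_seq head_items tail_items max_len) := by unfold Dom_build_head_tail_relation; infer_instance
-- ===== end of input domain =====

-- B restructures A's single fused index-based pass into three stages: materialize the adjacency-edge
-- list of all truncated sequences once, then build each relation by its own independent filtering pass
-- (the head pass iterating both orientations of each edge); objective: alternative decomposition, same cost.


-- relation[k].add(v) on a defaultdict(set): shared one-liner of both Pythons
def pvRelAdd (d : PySem.Dict Int (List Int)) (k v : Int) : PySem.Dict Int (List Int) :=
  d.modify k PySem.Set.empty (fun s => PySem.Set.add s v)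

-- seq[:-2][-max_len:]  (identical truncation expression in both Pythons)
def pvTrunc (max_len : Int) (seq : List Int) : List Int :=
  PySem.List.slice (PySem.List.slice seq none (some (-2))) (some (-max_len)) none

-- ===== PORT A =====
-- body of A's inner loop, at (idx, item) of enumerate(seq)
def pvStepA (head_items tail_items seq : List Int)
    (st : PySem.Dict Int (List Int) × PySem.Dict Int (List Int)) (p : Int × Int) :
    PySem.Dict Int (List Int) × PySem.Dict Int (List Int) :=
  let idx := p.1
  let item := p.2
  let st1 :=
    if head_items.contains item then
      let h :=
        if idx > 0 then
          match PySem.List.pyGet? seq (idx - 1) with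
          | some prevv => if tail_items.contains prevv then pvRelAdd st.1 item prevv else st.1
          | none => st.1
        else st.1
      let h :=
        if idx + 1 < (seq.length : Int) then
          match PySem.List.pyGet? seq (idx + 1) with
          | some nxt => if tail_items.contains nxt then pvRelAdd h item nxt else h
          | none => h
        else h
      (h, st.2)
    else st
  if tail_items.contains item then
    if idx > 0 then
      match PySem.List.pyGet? seq (idx - 1) with
      | some prevv => (st1.1, pvRelAdd st1.2 item prevv)
      | none => st1
    else st1
  else st1

def pvSeqA (head_items tail_items : List Int)
    (st : PySem.Dict Int (List Int) × PySem.Dict Int (List Int)) (seq : List Int) :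
    PySem.Dict Int (List Int) × PySem.Dict Int (List Int) :=
  (PySem.List.enumerate seq).foldl (pvStepA head_items tail_items seq) st

def build_head_tail_relation (user_seq : List (List Int)) (head_items : List Int) (tail_items : List Int) (max_len : Int) : (List (Int × List Int)) × (List (Int × List Int)) :=
  let user_seq2 := user_seq.map (pvTrunc max_len)
  let st := user_seq2.foldl (pvSeqA head_items tail_items) (PySem.Dict.empty, PySem.Dict.empty)
  (st.1.items, st.2.items)

-- ===== PORT B =====
-- stage 1: edges.extend(zip(seq, seq[1:])) over all truncated sequences
def pvEdges (user_seq : List (List Int)) (max_len : Int) : List (Int × Int) :=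
  user_seq.foldl (fun es seq => let s := pvTrunc max_len seq; es ++ s.zip s.tail) []

-- stage 2 inner body: for (h, t) in ((a, b), (b, a)): if h in head_items and t in tail_items: add
def pvOrient (head_items tail_items : List Int)
    (h : PySem.Dict Int (List Int)) (ht : Int × Int) : PySem.Dict Int (List Int) :=
  if head_items.contains ht.1 && tail_items.contains ht.2 then pvRelAdd h ht.1 ht.2 else h

def pvHeadStep (head_items tail_items : List Int)
    (h : PySem.Dict Int (List Int)) (e : Int × Int) : PySem.Dict Int (List Int) :=
  [(e.1, e.2), (e.2, e.1)].foldl (pvOrient head_items tail_items) h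

-- stage 3 body: if b in tail_items: tail_relation[b].add(a)
def pvTailStep (tail_items : List Int)
    (t : PySem.Dict Int (List Int)) (e : Int × Int) : PySem.Dict Int (List Int) :=
  if tail_items.contains e.2 then pvRelAdd t e.2 e.1 else t

def build_head_tail_relation_alt (user_seq : List (List Int)) (head_items : List Int) (tail_items : List Int) (max_len : Int) : (List (Int × List Int)) × (List (Int × List Int)) :=
  let edges := pvEdges user_seq max_len
  let head_relation := edges.foldl (pvHeadStep head_items tail_items) PySem.Dict.empty
  let tail_relation := edges.foldl (pvTailStep tail_items) PySem.Dict.empty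
  (head_relation.items, tail_relation.items)

-- ===== PRECONDITION & SPEC =====
def Spec_build_head_tail_relation (user_seq : List (List Int)) (head_items : List Int) (tail_items : List Int) (max_len : Int) (out : (List (Int × List Int)) × (List (Int × List Int))) : Prop := out = build_head_tail_relation_alt user_seq head_items tail_items max_len
instance (user_seq : List (List Int)) (head_items : List Int) (tail_items : List Int) (max_len : Int) (out : (List (Int × List Int)) × (List (Int × List Int))) : Decidable (Spec_build_head_tail_relation user_seq head_items tail_items max_len out) := by unfold Spec_build_head_tail_relation; infer_instance

-- ===== CLAIM (what is proved, stated in full; the proofs are below) =====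
def Claim_equal_build_head_tail_relation : Prop := ∀ (user_seq : List (List Int)) (head_items : List Int) (tail_items : List Int) (max_len : Int), Dom_build_head_tail_relation user_seq head_items tail_items max_len → Spec_build_head_tail_relation user_seq head_items tail_items max_len (build_head_tail_relation user_seq head_items tail_items max_len)

-- ===== LEMMAS AND PROOFS =====

-- combined per-edge step: what A does per adjacent pair (prev, cur) of a sequence
def pvPairStep (head_items tail_items : List Int)
    (st : PySem.Dict Int (List Int) × PySem.Dict Int (List Int)) (pr : Int × Int) :
    PySem.Dict Int (List Int) × PySem.Dict Int (List Int) :=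
  (pvHeadStep head_items tail_items st.1 pr, pvTailStep tail_items st.2 pr)

def pvHA (H T : List Int) (h : PySem.Dict Int (List Int)) (x y : Int) : PySem.Dict Int (List Int) :=
  if H.contains x && T.contains y then pvRelAdd h x y else h

-- the head-op B performs at pair (prev, suf.head) but A only performs while visiting suf.head
def pvPend (H T : List Int) (prev? : Option Int) (suf : List Int)
    (st : PySem.Dict Int (List Int) × PySem.Dict Int (List Int)) :
    PySem.Dict Int (List Int) × PySem.Dict Int (List Int) :=
  match prev?, suf with
  | some p, c :: _ => (pvHA H T st.1 p c, st.2)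
  | _, _ => st

def pvPrevZip (prev? : Option Int) (suf : List Int) : List (Int × Int) :=
  match prev? with
  | some p => (p :: suf).zip suf
  | none => suf.zip suf.tail

lemma pvGet_last (pre suf : List Int) (hpre : pre ≠ []) :
    PySem.List.pyGet? (pre ++ suf) ((pre.length : Int) - 1) = pre.getLast? := by
  have hlen : 1 ≤ pre.length := List.length_pos_iff.mpr hpre
  rw [show ((pre.length : Int) - 1) = ((pre.length - 1 : Nat) : Int) by omega,
    PySem.List.pyGet?_natCast, List.getElem?_append_left (by omega),
    List.getLast?_eq_getElem?]

lemma pvGet_next (pre : List Int) (c : Int) (rest : List Int) :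
    PySem.List.pyGet? (pre ++ c :: rest) ((pre.length : Int) + 1) = rest.head? := by
  rw [show ((pre.length : Int) + 1) = ((pre.length + 1 : Nat) : Int) by omega,
    PySem.List.pyGet?_natCast, List.getElem?_append_right (by omega)]
  simp [List.head?_eq_getElem?]

lemma pvStepA_first (H T : List Int) (c : Int) (rest : List Int)
    (st : PySem.Dict Int (List Int) × PySem.Dict Int (List Int)) :
    pvStepA H T (c :: rest) st (0, c) = pvPend H T (some c) rest st := by
  have hget : PySem.List.pyGet? (c :: rest) ((0 : Int) + 1) = rest.head? := by
    simpa using pvGet_next [] c rest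
  cases rest with
  | nil =>
    simp [pvStepA, pvPend]
  | cons r rest' =>
    simp only [pvStepA, pvPend, hget, List.head?_cons]
    have hlt : (0 : Int) + 1 < ((c :: r :: rest').length : Int) := by
      simp
    simp only [hlt, if_pos]
    by_cases hHc : c ∈ H <;> by_cases hTr : r ∈ T <;>
      simp [pvHA, hHc, hTr]

lemma pvStepA_mid (H T : List Int) (pre : List Int) (p : Int) (hp : pre.getLast? = some p)
    (c : Int) (rest : List Int)
    (st : PySem.Dict Int (List Int) × PySem.Dict Int (List Int)) :
    pvStepA H T (pre ++ c :: rest) (pvHA H T st.1 p c, st.2) ((pre.length : Int), c)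
      = pvPend H T (some c) rest (pvPairStep H T st (p, c)) := by
  have hpre : pre ≠ [] := by rintro rfl; simp at hp
  have hlen : 0 < pre.length := List.length_pos_iff.mpr hpre
  have hgt : (0 : Int) < (pre.length : Int) := by exact_mod_cast hlen
  have hprev : PySem.List.pyGet? (pre ++ c :: rest) ((pre.length : Int) - 1) = some p := by
    rw [pvGet_last pre (c :: rest) hpre, hp]
  have hnext : PySem.List.pyGet? (pre ++ c :: rest) ((pre.length : Int) + 1) = rest.head? := by
    exact pvGet_next pre c rest
  have hlt : ((pre.length : Int) + 1 < ((pre ++ c :: rest).length : Int)) ↔ rest ≠ [] := by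
    cases rest <;> simp [List.length_append]
  cases rest with
  | nil =>
    have hlt' : ¬ ((pre.length : Int) + 1 < ((pre ++ [c]).length : Int)) := by
      rw [hlt]; simp
    simp only [pvStepA, pvPend, pvPairStep, pvHeadStep, pvTailStep, pvOrient,
      List.foldl_cons, List.foldl_nil, hprev, hgt, hlt', if_pos]
    by_cases hHc : c ∈ H <;> by_cases hTp : p ∈ T <;>
      by_cases hTc : c ∈ T <;> by_cases hHp : p ∈ H <;>
      simp [pvHA, hHc, hTp, hTc, hHp]
  | cons r rest' =>
    have hlt' : (pre.length : Int) + 1 < ((pre ++ c :: r :: rest').length : Int) := by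
      rw [hlt]; simp
    simp only [pvStepA, pvPend, pvPairStep, pvHeadStep, pvTailStep, pvOrient,
      List.foldl_cons, List.foldl_nil, hprev, hnext, hgt, hlt', if_pos, List.head?_cons]
    by_cases hHc : c ∈ H <;> by_cases hTp : p ∈ T <;>
      by_cases hTc : c ∈ T <;> by_cases hHp : p ∈ H <;> by_cases hTr : r ∈ T <;>
      simp [pvHA, hHc, hTp, hTc, hHp, hTr]

lemma pvAux (H T : List Int) : ∀ (suf pre : List Int)
    (st : PySem.Dict Int (List Int) × PySem.Dict Int (List Int)),
    (PySem.List.enumerate suf (pre.length : Int)).foldl (pvStepA H T (pre ++ suf))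
        (pvPend H T pre.getLast? suf st)
      = (pvPrevZip pre.getLast? suf).foldl (pvPairStep H T) st := by
  intro suf
  induction suf with
  | nil =>
    intro pre st
    cases h : pre.getLast? <;> simp [pvPend, pvPrevZip, PySem.List.enumerate]
  | cons c rest ih =>
    intro pre st
    rw [PySem.List.enumerate_cons, List.foldl_cons]
    have hcast : (pre.length : Int) + 1 = (((pre ++ [c]).length : Nat) : Int) := by
      simp
    have happ : pre ++ c :: rest = (pre ++ [c]) ++ rest := by simp
    cases h : pre.getLast? with
    | none =>
      have hpre : pre = [] := by
        cases pre with
        | nil => rfl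
        | cons a l => simp at h
      subst hpre
      simp only [List.nil_append, List.length_nil, Nat.cast_zero, pvPend]
      rw [pvStepA_first H T c rest st]
      have := ih ([c]) st
      simp only [List.getLast?_singleton, List.length_cons, List.length_nil,
        List.singleton_append] at this
      rw [show ((0 : Int) + 1) = ((0 + 1 : Nat) : Int) by simp]
      rw [this]
      rfl
    | some p =>
      simp only [pvPend]
      have hfirst : pvStepA H T (pre ++ c :: rest) (pvHA H T st.1 p c, st.2) ((pre.length : Int), c)
          = pvPend H T (some c) rest (pvPairStep H T st (p, c)) := pvStepA_mid H T pre p h c rest st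
      rw [hfirst]
      have := ih (pre ++ [c]) (pvPairStep H T st (p, c))
      rw [List.getLast?_concat] at this
      rw [hcast, happ, this]
      simp [pvPrevZip]

lemma pvSeq_eq (H T : List Int)
    (st : PySem.Dict Int (List Int) × PySem.Dict Int (List Int)) (seq : List Int) :
    pvSeqA H T st seq = (seq.zip seq.tail).foldl (pvPairStep H T) st := by
  have h := pvAux H T seq [] st
  simpa [pvSeqA, pvPend, pvPrevZip] using h

-- the combined pair-fold splits into B's two independent folds
lemma pvSplit (H T : List Int) : ∀ (es : List (Int × Int))
    (st : PySem.Dict Int (List Int) × PySem.Dict Int (List Int)),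
    es.foldl (pvPairStep H T) st
      = (es.foldl (pvHeadStep H T) st.1, es.foldl (pvTailStep T) st.2) := by
  intro es
  induction es with
  | nil => intro st; simp
  | cons e rest ih => intro st; simp [List.foldl_cons, ih, pvPairStep]

-- a fold of per-sequence zip-folds is a single fold over the concatenated edge list
lemma pvFlat (H T : List Int) (ml : Int) : ∀ (l : List (List Int)) (es : List (Int × Int))
    (st : PySem.Dict Int (List Int) × PySem.Dict Int (List Int)),
    st = es.foldl (pvPairStep H T) (PySem.Dict.empty, PySem.Dict.empty) →
    l.foldl (fun st seq => ((pvTrunc ml seq).zip (pvTrunc ml seq).tail).foldl (pvPairStep H T) st) st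
      = (l.foldl (fun es seq => let s := pvTrunc ml seq; es ++ s.zip s.tail) es).foldl
          (pvPairStep H T) (PySem.Dict.empty, PySem.Dict.empty) := by
  intro l
  induction l with
  | nil => intro es st h; simpa using h
  | cons seq rest ih =>
    intro es st h
    simp only [List.foldl_cons]
    exact ih (es ++ (pvTrunc ml seq).zip (pvTrunc ml seq).tail) _
      (by rw [List.foldl_append, ← h])

theorem pv_main (user_seq : List (List Int)) (head_items tail_items : List Int) (max_len : Int) :
    build_head_tail_relation user_seq head_items tail_items max_len
      = build_head_tail_relation_alt user_seq head_items tail_items max_len := by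
  simp only [build_head_tail_relation, build_head_tail_relation_alt, pvEdges, List.foldl_map]
  have h1 : user_seq.foldl
      (fun st seq => pvSeqA head_items tail_items st (pvTrunc max_len seq))
      (PySem.Dict.empty, PySem.Dict.empty)
      = user_seq.foldl
      (fun st seq => ((pvTrunc max_len seq).zip (pvTrunc max_len seq).tail).foldl
        (pvPairStep head_items tail_items) st)
      (PySem.Dict.empty, PySem.Dict.empty) := by
    apply PySem.List.foldl_congr_mem
    exact fun st seq _ => pvSeq_eq head_items tail_items st (pvTrunc max_len seq)
  rw [h1, pvFlat head_items tail_items max_len user_seq [] _ (by simp),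
    pvSplit head_items tail_items]

-- ===== VERDICT (by name: the statement is the Claim_ definition above) =====
theorem build_head_tail_relation_spec : Claim_equal_build_head_tail_relation := by
  intro us H T ml _
  unfold Spec_build_head_tail_relation
  exact pv_main us H T ml
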